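-- pv_equiv track=rewrite | github.com/bjodah/chempy | chempy/printing/pretty.py | _formula_fmt
-- ===== SOURCE A (Python) =====
-- def _formula_fmt(s):
--     def _script(s, chs):
--         for i in range(10):
--             s = s.replace(chr(ord("0") + i), chs[i])
--         return s
--
--     e = ""
--     if "-" in s:
--         s, e = s.split("-")
--         e += u"⁻"
--     elif "+" in s:
--         s, e = s.split("+")
--         e += u"⁺"
--
--     return _script(s, u"₀₁₂₃₄₅₆₇₈₉") + _script(e, u"⁰¹²³⁴⁵⁶⁷⁸⁹")
-- ===== SOURCE B (Python) =====
-- _SUB = {"0": "\u2080", "1": "\u2081", "2": "\u2082", "3": "\u2083", "4": "\u2084",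
--         "5": "\u2085", "6": "\u2086", "7": "\u2087", "8": "\u2088", "9": "\u2089"}
-- _SUP = {"0": "\u2070", "1": "\u00b9", "2": "\u00b2", "3": "\u00b3", "4": "\u2074",
--         "5": "\u2075", "6": "\u2076", "7": "\u2077", "8": "\u2078", "9": "\u2079"}
--
--
-- def _formula_fmt(s):
--     # one left-to-right scan with a mode flag: subscript mode before the charge
--     # sign, superscript mode after it; the sign's glyph is appended at the end.
--     sign = "-" if "-" in s else "+"
--     out = []
--     sup = False
--     for ch in s:
--         if ch == sign:
--             sup = True
--         elif sup:
--             out.append(_SUP.get(ch, ch))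
--         else:
--             out.append(_SUB.get(ch, ch))
--     if sup:
--         out.append("\u207b" if sign == "-" else "\u207a")
--     return "".join(out)
-- ===== Notes on version B (the rewrite author's own statement) =====
-- stated objective: alternative
-- what changed: Replaced split-into-parts plus ten full-string replace passes per part by a single left-to-right scan with a mode flag: characters are emitted through a subscript dict until the charge sign is seen, then through a superscript dict, with the sign's glyph appended at the end; the string is never split.
-- crash fix: A raises ValueError (tuple unpacking of split) when the minus sign occurs more than once, or it is absent and the plus sign occurs more than once; B's single pass returns the formatted string treating the first sign as the charge split, e.g. '₁²³⁻' on '1-2-3'. — e.g. on _formula_fmt("1-2-3"): A raises ValueError, B returns "₁²³⁻"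
import Mathlib
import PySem

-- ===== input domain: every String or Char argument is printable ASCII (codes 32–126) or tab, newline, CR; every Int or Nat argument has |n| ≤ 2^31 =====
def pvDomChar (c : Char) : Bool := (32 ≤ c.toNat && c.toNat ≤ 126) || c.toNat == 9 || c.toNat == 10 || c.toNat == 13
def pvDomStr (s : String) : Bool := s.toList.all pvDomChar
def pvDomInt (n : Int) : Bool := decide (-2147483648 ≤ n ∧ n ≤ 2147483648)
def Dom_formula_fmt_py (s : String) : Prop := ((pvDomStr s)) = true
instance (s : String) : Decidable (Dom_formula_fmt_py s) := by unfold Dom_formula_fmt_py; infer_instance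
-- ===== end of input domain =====

-- B replaces A's split-into-parts + ten replace passes per part by ONE left-to-right
-- scan with a mode flag (subscript before the charge sign, superscript after, glyph
-- appended at the end); objective: alternative single-pass algorithm.

-- ===== PORT A =====
-- inner helper _script: for i in range(10): s = s.replace(chr(ord('0')+i), chs[i])
-- (chs[i] is always in range for the two 10-glyph strings A passes, so pyGetD's default is never used)
def pvScriptA (s : List Char) (chs : List Char) : List Char :=
  (PySem.List.pyRange 0 10 1).foldl
    (fun s i => PySem.Chars.replace s [Char.ofNat (48 + i.toNat)] [PySem.List.pyGetD chs i ' '])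
    s

def formula_fmt_py (s : String) : String :=
  let cs := s.toList
  let p : List Char × List Char :=
    if PySem.Chars.isIn ['-'] cs then
      match PySem.Chars.splitOn cs ['-'] with
      | [a, b] => (a, b ++ ['⁻'])
      | _ => ([], [])   -- Python raises ValueError here (≠ 2 parts); outside Pre_
    else if PySem.Chars.isIn ['+'] cs then
      match PySem.Chars.splitOn cs ['+'] with
      | [a, b] => (a, b ++ ['⁺'])
      | _ => ([], [])   -- Python raises ValueError here; outside Pre_
    else (cs, [])
  String.ofList (pvScriptA p.1 "₀₁₂₃₄₅₆₇₈₉".toList ++ pvScriptA p.2 "⁰¹²³⁴⁵⁶⁷⁸⁹".toList)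

-- ===== PORT B =====
-- the two digit→glyph dicts (_SUB, _SUP) as association lists, dict.get(ch, ch) = pvLookup
def pvSubTable : List (Char × Char) :=
  [('0','₀'),('1','₁'),('2','₂'),('3','₃'),('4','₄'),('5','₅'),('6','₆'),('7','₇'),('8','₈'),('9','₉')]

def pvSupTable : List (Char × Char) :=
  [('0','⁰'),('1','¹'),('2','²'),('3','³'),('4','⁴'),('5','⁵'),('6','⁶'),('7','⁷'),('8','⁸'),('9','⁹')]

def pvLookup : List (Char × Char) → Char → Char
  | [], c => c
  | (k, v) :: t, c => if c = k then v else pvLookup t c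

-- the for-loop of B: state = (out list so far, superscript-mode flag)
def formula_fmt_py_alt (s : String) : String :=
  let cs := s.toList
  let sign : Char := if PySem.Chars.isIn ['-'] cs then '-' else '+'
  let st : List Char × Bool :=
    cs.foldl
      (fun st ch =>
        if ch = sign then (st.1, true)
        else if st.2 then (st.1 ++ [pvLookup pvSupTable ch], st.2)
        else (st.1 ++ [pvLookup pvSubTable ch], st.2))
      ([], false)
  String.ofList (if st.2 then st.1 ++ [if sign = '-' then '⁻' else '⁺'] else st.1)

-- ===== PRECONDITION & SPEC =====
-- Pre_ excludes exactly the inputs on which A RAISES ValueError: the two-variable tuple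
-- unpacking of the split result fails when the chosen sign character occurs more than once.
def Pre_formula_fmt_py (s : String) : Prop :=
  s.toList.count '-' ≤ 1 ∧ (s.toList.count '-' = 0 → s.toList.count '+' ≤ 1)
instance (s : String) : Decidable (Pre_formula_fmt_py s) := by unfold Pre_formula_fmt_py; infer_instance
def pvWitness_formula_fmt_py : String := "SO4-2"

-- A raises ValueError (tuple unpacking of split) when the minus sign occurs more than once, or it is
-- absent and the plus sign occurs more than once; B's single pass returns the formatted string there.
def Raises_formula_fmt_py (s : String) : Prop :=
  2 ≤ s.toList.count '-' ∨ (s.toList.count '-' = 0 ∧ 2 ≤ s.toList.count '+')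
instance (s : String) : Decidable (Raises_formula_fmt_py s) := by unfold Raises_formula_fmt_py; infer_instance
def pvRaiseWitness_formula_fmt_py : String := "1-2-3"
def pvRaiseWitnessOut_formula_fmt_py : String := "₁²³⁻"

def Spec_formula_fmt_py (s : String) (out : String) : Prop := out = formula_fmt_py_alt s
instance (s : String) (out : String) : Decidable (Spec_formula_fmt_py s out) := by unfold Spec_formula_fmt_py; infer_instance

-- ===== CLAIM (what is proved, stated in full; the proofs are below) =====
def Claim_equal_formula_fmt_py : Prop := ∀ (s : String), Dom_formula_fmt_py s → Pre_formula_fmt_py s → Spec_formula_fmt_py s (formula_fmt_py s)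
def Claim_raises_formula_fmt_py : Prop := (∀ (s : String), Dom_formula_fmt_py s → Raises_formula_fmt_py s → ¬ Pre_formula_fmt_py s) ∧ (Dom_formula_fmt_py (pvRaiseWitness_formula_fmt_py) ∧ Raises_formula_fmt_py (pvRaiseWitness_formula_fmt_py) ∧ formula_fmt_py_alt (pvRaiseWitness_formula_fmt_py) = pvRaiseWitnessOut_formula_fmt_py)

-- ===== LEMMAS AND PROOFS =====

-- a single-character replace is a character map
theorem pvReplaceGo_single (a b : Char) :
    ∀ (fuel : Nat) (l acc : List Char), l.length ≤ fuel →
      PySem.Chars.replace.go [a] [b] fuel l acc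
        = acc.reverse ++ l.map (fun c => if c = a then b else c) := by
  intro fuel
  induction fuel with
  | zero =>
    intro l acc h
    have : l = [] := List.length_eq_zero_iff.mp (Nat.le_zero.mp h)
    subst this; simp [PySem.Chars.replace.go]
  | succ n ih =>
    intro l acc h
    cases l with
    | nil => simp [PySem.Chars.replace.go]
    | cons c t =>
      by_cases hc : c = a
      · subst hc
        have hpre : List.isPrefixOf [c] (c :: t) = true := by
          simp [List.isPrefixOf]
        rw [PySem.Chars.replace.go, if_pos hpre]
        show PySem.Chars.replace.go [c] [b] n t (b :: acc) = _
        rw [ih t (b :: acc) (by simpa using Nat.lt_succ_iff.mp (by simpa using h))]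
        simp
      · have hpre : List.isPrefixOf [a] (c :: t) = false := by
          simp [List.isPrefixOf]; intro hh; exact absurd hh.symm (by simpa using hc)
        rw [PySem.Chars.replace.go, if_neg (by simp [hpre])]
        show PySem.Chars.replace.go [a] [b] n t (c :: acc) = _
        rw [ih t (c :: acc) (by simpa using Nat.lt_succ_iff.mp (by simpa using h))]
        simp [hc]

theorem pvReplace_single (a b : Char) (l : List Char) :
    PySem.Chars.replace l [a] [b] = l.map (fun c => if c = a then b else c) := by
  rw [PySem.Chars.replace]
  simp only [List.isEmpty_cons]
  rw [if_neg (by simp)]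
  exact pvReplaceGo_single a b l.length l [] (le_refl _)

theorem pvScriptA_sub (cs : List Char) :
    pvScriptA cs "₀₁₂₃₄₅₆₇₈₉".toList = cs.map (pvLookup pvSubTable) := by
  have hr : PySem.List.pyRange 0 10 1 = [0,1,2,3,4,5,6,7,8,9] := by decide
  unfold pvScriptA
  rw [hr]
  simp only [List.foldl_cons, List.foldl_nil, pvReplace_single, List.map_map]
  refine List.map_congr_left (fun c _ => ?_)
  by_cases h0 : c = '0'; · subst h0; decide
  by_cases h1 : c = '1'; · subst h1; decide
  by_cases h2 : c = '2'; · subst h2; decide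
  by_cases h3 : c = '3'; · subst h3; decide
  by_cases h4 : c = '4'; · subst h4; decide
  by_cases h5 : c = '5'; · subst h5; decide
  by_cases h6 : c = '6'; · subst h6; decide
  by_cases h7 : c = '7'; · subst h7; decide
  by_cases h8 : c = '8'; · subst h8; decide
  by_cases h9 : c = '9'; · subst h9; decide
  simp [pvSubTable, pvLookup, show (Char.ofNat 48) = '0' from rfl,
    show (Char.ofNat 49) = '1' from rfl, show (Char.ofNat 50) = '2' from rfl,
    show (Char.ofNat 51) = '3' from rfl, show (Char.ofNat 52) = '4' from rfl,
    show (Char.ofNat 53) = '5' from rfl, show (Char.ofNat 54) = '6' from rfl,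
    show (Char.ofNat 55) = '7' from rfl, show (Char.ofNat 56) = '8' from rfl,
    show (Char.ofNat 57) = '9' from rfl, h0, h1, h2, h3, h4, h5, h6, h7, h8, h9]

theorem pvScriptA_sup (cs : List Char) :
    pvScriptA cs "⁰¹²³⁴⁵⁶⁷⁸⁹".toList = cs.map (pvLookup pvSupTable) := by
  have hr : PySem.List.pyRange 0 10 1 = [0,1,2,3,4,5,6,7,8,9] := by decide
  unfold pvScriptA
  rw [hr]
  simp only [List.foldl_cons, List.foldl_nil, pvReplace_single, List.map_map]
  refine List.map_congr_left (fun c _ => ?_)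
  by_cases h0 : c = '0'; · subst h0; decide
  by_cases h1 : c = '1'; · subst h1; decide
  by_cases h2 : c = '2'; · subst h2; decide
  by_cases h3 : c = '3'; · subst h3; decide
  by_cases h4 : c = '4'; · subst h4; decide
  by_cases h5 : c = '5'; · subst h5; decide
  by_cases h6 : c = '6'; · subst h6; decide
  by_cases h7 : c = '7'; · subst h7; decide
  by_cases h8 : c = '8'; · subst h8; decide
  by_cases h9 : c = '9'; · subst h9; decide
  simp [pvSupTable, pvLookup, show (Char.ofNat 48) = '0' from rfl,
    show (Char.ofNat 49) = '1' from rfl, show (Char.ofNat 50) = '2' from rfl,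
    show (Char.ofNat 51) = '3' from rfl, show (Char.ofNat 52) = '4' from rfl,
    show (Char.ofNat 53) = '5' from rfl, show (Char.ofNat 54) = '6' from rfl,
    show (Char.ofNat 55) = '7' from rfl, show (Char.ofNat 56) = '8' from rfl,
    show (Char.ofNat 57) = '9' from rfl, h0, h1, h2, h3, h4, h5, h6, h7, h8, h9]

-- a single character is an infix iff it is a member
theorem pvSingletonInfix (g : Char) (l : List Char) : [g] <:+: l ↔ g ∈ l := by
  constructor
  · intro h; exact (List.infix_iff_prefix_suffix.mp h).elim
      (fun _ ⟨hp, hs⟩ => hs.subset (hp.subset (List.mem_singleton_self g)))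
  · intro h
    obtain ⟨a, b, rfl⟩ := List.append_of_mem h
    exact ⟨a, b, by simp⟩

-- first-occurrence decomposition
theorem pvFirstSplit (g : Char) (l : List Char) (h : g ∈ l) :
    ∃ a b, l = a ++ g :: b ∧ g ∉ a := by
  induction l with
  | nil => cases h
  | cons c t ih =>
    by_cases hc : c = g
    · exact ⟨[], t, by simp [hc], by simp⟩
    · obtain ⟨a, b, rfl, ha⟩ := ih (by cases h with
        | head => exact absurd rfl hc
        | tail _ h => exact h)
      exact ⟨c :: a, b, rfl, by simp [ha, Ne.symm (by simpa using hc)]⟩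

-- splitOn.go with a single-character separator absent from the remainder
theorem pvSplitGoAbsent (g : Char) :
    ∀ (fuel : Nat) (l cur : List Char) (acc : List (List Char)), g ∉ l →
      PySem.Chars.splitOn.go [g] fuel l cur acc = (((cur.reverse ++ l) :: acc)).reverse := by
  intro fuel
  induction fuel with
  | zero => intro l cur acc _; rw [PySem.Chars.splitOn.go]
  | succ n ih =>
    intro l cur acc hg
    cases l with
    | nil => rw [PySem.Chars.splitOn.go] <;> simp
    | cons c t =>
      have hc : ¬ c = g := fun h => hg (h ▸ List.mem_cons_self)
      have hpre : List.isPrefixOf [g] (c :: t) = false := by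
        simp [List.isPrefixOf]; intro hh; exact absurd hh.symm hc
      rw [PySem.Chars.splitOn.go, if_neg (by simp [hpre])]
      rw [ih t (c :: cur) acc (fun h => hg (List.mem_cons_of_mem _ h))]
      simp

theorem pvSplitGoOnce (g : Char) (b : List Char) (hb : g ∉ b) :
    ∀ (a : List Char) (fuel : Nat) (cur : List Char) (acc : List (List Char)),
      g ∉ a → a.length < fuel →
      PySem.Chars.splitOn.go [g] fuel (a ++ g :: b) cur acc
        = acc.reverse ++ [cur.reverse ++ a, b] := by
  intro a
  induction a with
  | nil =>
    intro fuel cur acc _ hf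
    cases fuel with
    | zero => omega
    | succ n =>
      have hpre : List.isPrefixOf [g] (g :: b) = true := by simp [List.isPrefixOf]
      rw [show ([] ++ g :: b : List Char) = g :: b from rfl,
          PySem.Chars.splitOn.go, if_pos hpre]
      have : List.drop (List.length [g]) (g :: b) = b := by simp
      rw [this, pvSplitGoAbsent g n b [] (cur.reverse :: acc) hb]
      simp
  | cons c t ih =>
    intro fuel cur acc ha hf
    cases fuel with
    | zero => omega
    | succ n =>
      have hc : ¬ c = g := fun h => ha (h ▸ List.mem_cons_self)
      have hpre : List.isPrefixOf [g] (c :: (t ++ g :: b)) = false := by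
        simp [List.isPrefixOf]; intro hh; exact absurd hh.symm hc
      rw [show ((c :: t) ++ g :: b : List Char) = c :: (t ++ g :: b) from rfl,
          PySem.Chars.splitOn.go, if_neg (by simp [hpre])]
      rw [ih n (c :: cur) acc (fun h => ha (List.mem_cons_of_mem _ h)) (by simpa using hf)]
      simp

theorem pvSplitOnce (g : Char) (a b : List Char) (ha : g ∉ a) (hb : g ∉ b) :
    PySem.Chars.splitOn (a ++ g :: b) [g] = [a, b] := by
  rw [PySem.Chars.splitOn,
      pvSplitGoOnce g b hb a ((a ++ g :: b).length + 1) [] [] ha (by simp)]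
  simp

-- B's loop over a sign-free segment, in each mode
theorem pvFoldAbsent (sign : Char) (l : List Char) (hl : sign ∉ l) :
    ∀ (acc : List Char) (m : Bool),
      l.foldl
        (fun (st : List Char × Bool) ch =>
          if ch = sign then (st.1, true)
          else if st.2 then (st.1 ++ [pvLookup pvSupTable ch], st.2)
          else (st.1 ++ [pvLookup pvSubTable ch], st.2))
        (acc, m)
      = (acc ++ l.map (pvLookup (if m then pvSupTable else pvSubTable)), m) := by
  induction l with
  | nil => intro acc m; simp
  | cons c t ih =>
    intro acc m
    have hc : ¬ c = sign := fun h => hl (h ▸ List.mem_cons_self)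
    have ht : sign ∉ t := fun h => hl (List.mem_cons_of_mem _ h)
    cases m with
    | false =>
      simp only [List.foldl_cons, if_neg hc, Bool.false_eq_true, if_false]
      rw [ih ht (acc ++ [pvLookup pvSubTable c]) false]
      simp
    | true =>
      simp only [List.foldl_cons, if_neg hc, if_true]
      rw [ih ht (acc ++ [pvLookup pvSupTable c]) true]
      simp

-- the full loop on a ++ sign :: b (sign absent from a and b)
theorem pvFoldOnce (sign : Char) (a b : List Char) (ha : sign ∉ a) (hb : sign ∉ b) :
    (a ++ sign :: b).foldl
        (fun (st : List Char × Bool) ch =>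
          if ch = sign then (st.1, true)
          else if st.2 then (st.1 ++ [pvLookup pvSupTable ch], st.2)
          else (st.1 ++ [pvLookup pvSubTable ch], st.2))
        ([], false)
      = (a.map (pvLookup pvSubTable) ++ b.map (pvLookup pvSupTable), true) := by
  rw [List.foldl_append, pvFoldAbsent sign a ha [] false, List.foldl_cons,
      if_pos (rfl : sign = sign)]
  rw [pvFoldAbsent sign b hb _ true]
  simp

theorem pvCountZero (g : Char) (l : List Char) : l.count g = 0 ↔ g ∉ l := by
  simp [List.count_eq_zero]

-- ===== VERDICT (by name: the statement is the Claim_ definition above) =====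
theorem formula_fmt_py_spec : Claim_equal_formula_fmt_py := by
  intro s _ hpre
  show formula_fmt_py s = formula_fmt_py_alt s
  obtain ⟨h1, h2⟩ := hpre
  unfold formula_fmt_py formula_fmt_py_alt
  by_cases hm : '-' ∈ s.toList
  · -- '-' present, exactly once
    have hin : PySem.Chars.isIn ['-'] s.toList = true :=
      (PySem.Chars.isIn_iff_infix _ _).mpr ((pvSingletonInfix _ _).mpr hm)
    obtain ⟨a, b, hsplit, ha⟩ := pvFirstSplit '-' s.toList hm
    have hcnt : a.count '-' + (1 + b.count '-') = s.toList.count '-' := by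
      rw [hsplit]; simp [List.count_append]; ring
    have hb : '-' ∉ b := by
      rw [← pvCountZero]; omega
    simp only [hin, if_true]
    rw [hsplit, pvSplitOnce '-' a b ha hb, pvFoldOnce '-' a b ha hb]
    simp only [pvScriptA_sub, pvScriptA_sup]
    simp [show pvLookup pvSupTable '⁻' = '⁻' from by decide]
  · -- no '-'
    have hin : PySem.Chars.isIn ['-'] s.toList = false := by
      rw [PySem.Chars.isIn_eq_false_iff]
      intro h; exact hm ((pvSingletonInfix _ _).mp h)
    simp only [hin, Bool.false_eq_true, if_false]
    have hz : s.toList.count '-' = 0 := (pvCountZero _ _).mpr hm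
    by_cases hp : '+' ∈ s.toList
    · have hinp : PySem.Chars.isIn ['+'] s.toList = true :=
        (PySem.Chars.isIn_iff_infix _ _).mpr ((pvSingletonInfix _ _).mpr hp)
      obtain ⟨a, b, hsplit, ha⟩ := pvFirstSplit '+' s.toList hp
      have hcnt : a.count '+' + (1 + b.count '+') = s.toList.count '+' := by
        rw [hsplit]; simp [List.count_append]; ring
      have h2' := h2 hz
      have hb : '+' ∉ b := by rw [← pvCountZero]; omega
      simp only [hinp, if_true]
      rw [hsplit, pvSplitOnce '+' a b ha hb, pvFoldOnce '+' a b ha hb]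
      simp only [pvScriptA_sub, pvScriptA_sup]
      simp [show pvLookup pvSupTable '⁺' = '⁺' from by decide]
    · have hinp : PySem.Chars.isIn ['+'] s.toList = false := by
        rw [PySem.Chars.isIn_eq_false_iff]
        intro h; exact hp ((pvSingletonInfix _ _).mp h)
      simp only [hinp, Bool.false_eq_true, if_false]
      rw [pvFoldAbsent '+' s.toList hp [] false]
      simp only [pvScriptA_sub, pvScriptA_sup]
      simp

def formula_fmt_py_raises : Claim_raises_formula_fmt_py := by
  unfold Claim_raises_formula_fmt_py
  constructor
  · intro s _ hr hpre
    obtain ⟨h1, h2⟩ := hpre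
    cases hr with
    | inl h => omega
    | inr h => have := h2 h.1; omega
  · exact ⟨by decide, by decide, by decide⟩
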